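-- pv_equiv track=rewrite | github.com/nasa/ExoMiner | src_preprocessing/diff_img/search_neighbors/prepare_targets_table_for_search.py | _convert_sectors_observed_format
-- ===== SOURCE A (Python) =====
-- def _convert_sectors_observed_format(x):
--
--     MAX_NUM_SECTORS = 150
--
--     if '_' in x['sectors_observed'] or len(x['sectors_observed']) != MAX_NUM_SECTORS:
--         sectors_lst = [int(sector_str) for sector_str in x['sectors_observed'].split('_')]
--         sectors_observed = ''.join(['0' if sector_i not in sectors_lst else '1' for sector_i in
--                                     range(MAX_NUM_SECTORS)])
--         x['sectors_observed'] = sectors_observed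
--
--     return x
-- ===== SOURCE B (Python) =====
-- def _convert_sectors_observed_format(x):
--     # Run-length construction: sort the deduped in-range sectors and emit the
--     # 150-char bitmask as '0'-gap chunks followed by '1's, instead of scanning
--     # all 150 positions with a membership test.  Mutates x like A does.
--     MAX_NUM_SECTORS = 150
--     s = x['sectors_observed']
--     if '_' not in s and len(s) == MAX_NUM_SECTORS:
--         return x
--     hits = sorted(set(v for v in (int(t) for t in s.split('_')) if 0 <= v < MAX_NUM_SECTORS))
--     chunks = []
--     prev = -1
--     for h in hits:
--         chunks.append('0' * (h - prev - 1) + '1')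
--         prev = h
--     chunks.append('0' * (MAX_NUM_SECTORS - 1 - prev))
--     x['sectors_observed'] = ''.join(chunks)
--     return x
-- ===== Notes on version B (the rewrite author's own statement) =====
-- stated objective: alternative
-- what changed: Replaces the gather loop (150 positions, each tested for membership in the sector list) by a run-length build: sort the deduped in-range sectors and concatenate '0'-gap chunks and '1's, touching each output character once.
import Mathlib
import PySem

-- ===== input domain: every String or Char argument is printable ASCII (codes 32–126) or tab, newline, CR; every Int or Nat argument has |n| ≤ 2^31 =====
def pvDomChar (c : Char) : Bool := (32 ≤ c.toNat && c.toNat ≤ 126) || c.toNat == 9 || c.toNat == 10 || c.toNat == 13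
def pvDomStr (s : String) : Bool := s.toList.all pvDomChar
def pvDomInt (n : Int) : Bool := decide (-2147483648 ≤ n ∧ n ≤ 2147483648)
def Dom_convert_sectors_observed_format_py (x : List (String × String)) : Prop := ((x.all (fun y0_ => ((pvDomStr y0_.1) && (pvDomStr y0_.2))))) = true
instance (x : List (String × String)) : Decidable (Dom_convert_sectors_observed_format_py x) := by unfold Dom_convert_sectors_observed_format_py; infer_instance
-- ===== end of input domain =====

-- B builds the bitmask run-length-wise from the sorted deduped in-range sectors instead of
-- scanning all 150 positions with a membership test (objective: alternative algorithm).
-- Equivalence is about the RETURN value; the Python A mutates the dict x in place (B does the same).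

-- ===== PORT A =====
-- ''.join of a list of one-character strings is ported as String.ofList of the characters.
def convert_sectors_observed_format_py (x : List (String × String)) : List (String × String) :=
  let d := PySem.Dict.ofList x
  match d.get? "sectors_observed" with
  | none => d.items  -- KeyError in Python; excluded by Pre_
  | some s =>
    if PySem.Str.isIn "_" s || PySem.Str.len s != 150 then
      let sectors_lst := (PySem.Chars.splitOn s.toList ['_']).map (fun p => (PySem.Int.ofChars? p).getD 0)
      let sectors_observed :=
        String.ofList ((PySem.List.pyRange 0 150 1).map
          (fun sector_i => if sectors_lst.contains sector_i = false then '0' else '1'))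
      (d.insert "sectors_observed" sectors_observed).items
    else d.items

-- ===== PORT B =====
-- '0' * n is List.replicate n '0'; the for-loop over hits is a foldl carrying (chunks, prev).
def convert_sectors_observed_format_py_alt (x : List (String × String)) : List (String × String) :=
  let d := PySem.Dict.ofList x
  match d.get? "sectors_observed" with
  | none => d.items  -- KeyError in Python; excluded by Pre_
  | some s =>
    if !(PySem.Str.isIn "_" s) && PySem.Str.len s == 150 then d.items
    else
      let hits := PySem.List.sorted (PySem.Set.ofList
        (((PySem.Chars.splitOn s.toList ['_']).map (fun t => (PySem.Int.ofChars? t).getD 0)).filter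
          (fun v => decide (0 ≤ v) && decide (v < 150)))) (fun v => v) false
      let st := hits.foldl
        (fun (acc : List Char × Int) h =>
          (acc.1 ++ (List.replicate (h - acc.2 - 1).toNat '0' ++ ['1']), h)) ([], -1)
      (d.insert "sectors_observed"
        (String.ofList (st.1 ++ List.replicate (150 - 1 - st.2).toNat '0'))).items

-- ===== PRECONDITION & SPEC =====
-- Pre_ excludes exactly the inputs where the Python A raises: a dict without the key
-- 'sectors_observed' (KeyError), or one whose value enters the rebuild branch with a
-- '_'-piece that int() rejects (ValueError).
def pvPreCheck (x : List (String × String)) : Bool :=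
  match (PySem.Dict.ofList x).get? "sectors_observed" with
  | none => false
  | some s =>
    !(PySem.Str.isIn "_" s || PySem.Str.len s != 150) ||
      (PySem.Chars.splitOn s.toList ['_']).all (fun p => (PySem.Int.ofChars? p).isSome)

def Pre_convert_sectors_observed_format_py (x : List (String × String)) : Prop := pvPreCheck x = true
instance (x : List (String × String)) : Decidable (Pre_convert_sectors_observed_format_py x) := by
  unfold Pre_convert_sectors_observed_format_py; infer_instance

def pvWitness_convert_sectors_observed_format_py : (List (String × String)) := [("sectors_observed", "3_5")]

def Spec_convert_sectors_observed_format_py (x : List (String × String)) (out : List (String × String)) : Prop := out = convert_sectors_observed_format_py_alt x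
instance (x : List (String × String)) (out : List (String × String)) : Decidable (Spec_convert_sectors_observed_format_py x out) := by unfold Spec_convert_sectors_observed_format_py; infer_instance

-- ===== CLAIM (what is proved, stated in full; the proofs are below) =====
def Claim_equal_convert_sectors_observed_format_py : Prop := ∀ (x : List (String × String)), Dom_convert_sectors_observed_format_py x → Pre_convert_sectors_observed_format_py x → Spec_convert_sectors_observed_format_py x (convert_sectors_observed_format_py x)

-- ===== LEMMAS AND PROOFS =====

-- Run-length invariant: folding over a strictly increasing list of hits, all in (prev,150),
-- then padding with trailing zeros, produces the membership bitmask of the range (prev+1)..150.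
lemma pv_runlength (hits : List Int) : ∀ (buf : List Char) (prev : Int),
    hits.Pairwise (· < ·) → (∀ h ∈ hits, prev < h ∧ h < 150) → prev < 150 →
    (hits.foldl (fun (acc : List Char × Int) h =>
        (acc.1 ++ (List.replicate (h - acc.2 - 1).toNat '0' ++ ['1']), h)) (buf, prev)).1
      ++ List.replicate (150 - 1 - (hits.foldl (fun (acc : List Char × Int) h =>
        (acc.1 ++ (List.replicate (h - acc.2 - 1).toNat '0' ++ ['1']), h)) (buf, prev)).2).toNat '0'
    = buf ++ (PySem.List.pyRange (prev + 1) 150 1).map (fun i => if i ∈ hits then '1' else '0') := by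
  induction hits with
  | nil =>
    intro buf prev _ _ hp
    have : (PySem.List.pyRange (prev + 1) 150 1).map (fun i => if i ∈ ([] : List Int) then '1' else '0')
        = List.replicate (150 - 1 - prev).toNat '0' := by
      rw [List.map_congr_left (g := fun _ => '0') (by intro i _; simp)]
      rw [List.map_const', PySem.List.length_pyRange_one]
      congr 1; omega
    simp only [List.foldl_nil, this]
  | cons h t ih =>
    intro buf prev hpw hb hp
    obtain ⟨hph, hpt⟩ := List.pairwise_cons.mp hpw
    have hh := hb h (by simp)
    simp only [List.foldl_cons]
    rw [ih _ h hpt (fun y hy => ⟨hph y hy, (hb y (by simp [hy])).2⟩) hh.2]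
    have hsplit : PySem.List.pyRange (prev + 1) 150 1
        = PySem.List.pyRange (prev + 1) h 1 ++ PySem.List.pyRange h 150 1 :=
      PySem.List.pyRange_one_append _ _ _ (by omega) (by omega)
    have hcons : PySem.List.pyRange h 150 1 = h :: PySem.List.pyRange (h + 1) 150 1 :=
      PySem.List.pyRange_one_cons (by omega)
    rw [hsplit, hcons]
    have hlow : (PySem.List.pyRange (prev + 1) h 1).map (fun i => if i ∈ h :: t then '1' else '0')
        = List.replicate (h - prev - 1).toNat '0' := by
      rw [List.map_congr_left (g := fun _ => '0') ?_]
      · rw [List.map_const', PySem.List.length_pyRange_one]; congr 1; omega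
      · intro i hi
        have hi' := (PySem.List.mem_pyRange_one).mp hi
        have : i ∉ h :: t := by
          simp only [List.mem_cons]
          rintro (rfl | hit)
          · omega
          · exact absurd (hph i hit) (by omega)
        simp [this]
    have hhigh : (PySem.List.pyRange (h + 1) 150 1).map (fun i => if i ∈ h :: t then '1' else '0')
        = (PySem.List.pyRange (h + 1) 150 1).map (fun i => if i ∈ t then '1' else '0') := by
      apply List.map_congr_left
      intro i hi
      have hi' := (PySem.List.mem_pyRange_one).mp hi
      have : (i ∈ h :: t) ↔ (i ∈ t) := by
        constructor
        · intro hm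
          rcases List.mem_cons.mp hm with rfl | hit
          · omega
          · exact hit
        · exact fun hm => List.mem_cons.mpr (Or.inr hm)
      simp only [this]
    simp only [List.map_append, List.map_cons, hlow, hhigh]
    simp [List.append_assoc]

-- The two bitmask constructions agree.
lemma pv_mask_eq (l : List Int) :
    (PySem.List.pyRange 0 150 1).map
        (fun sector_i => if l.contains sector_i = false then '0' else '1')
      = ((PySem.List.sorted (PySem.Set.ofList
            (l.filter (fun v => decide (0 ≤ v) && decide (v < 150)))) (fun v => v) false).foldl
          (fun (acc : List Char × Int) h =>
            (acc.1 ++ (List.replicate (h - acc.2 - 1).toNat '0' ++ ['1']), h)) ([], -1)).1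
        ++ List.replicate (150 - 1 - ((PySem.List.sorted (PySem.Set.ofList
            (l.filter (fun v => decide (0 ≤ v) && decide (v < 150)))) (fun v => v) false).foldl
          (fun (acc : List Char × Int) h =>
            (acc.1 ++ (List.replicate (h - acc.2 - 1).toNat '0' ++ ['1']), h)) ([], -1)).2).toNat '0' := by
  set hits := PySem.List.sorted (PySem.Set.ofList
      (l.filter (fun v => decide (0 ≤ v) && decide (v < 150)))) (fun v => v) false with hhits
  have hmem : ∀ i : Int, i ∈ hits ↔ (i ∈ l ∧ 0 ≤ i ∧ i < 150) := by
    intro i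
    rw [hhits, PySem.List.mem_sorted, PySem.Set.mem_ofList, List.mem_filter]
    simp
  have hpw : hits.Pairwise (· < ·) := PySem.List.sorted_ofList_pairwise_lt _
  have hb : ∀ h ∈ hits, (-1 : Int) < h ∧ h < 150 := by
    intro h hh; have := (hmem h).mp hh; omega
  rw [pv_runlength hits [] (-1) hpw hb (by omega)]
  simp only [List.nil_append]
  have h0 : (-1 : Int) + 1 = 0 := by omega
  rw [h0]
  apply List.map_congr_left
  intro i hi
  have hi' := (PySem.List.mem_pyRange_one).mp hi
  by_cases hm : i ∈ l
  · have : i ∈ hits := (hmem i).mpr ⟨hm, by omega, by omega⟩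
    simp [hm, this]
  · have : i ∉ hits := fun h => hm ((hmem i).mp h).1
    simp [hm, this]

-- ===== VERDICT (by name: the statement is the Claim_ definition above) =====
theorem convert_sectors_observed_format_py_spec : Claim_equal_convert_sectors_observed_format_py := by
  intro x _ hpre
  unfold Spec_convert_sectors_observed_format_py
  unfold convert_sectors_observed_format_py convert_sectors_observed_format_py_alt
  cases h : (PySem.Dict.ofList x).get? "sectors_observed" with
  | none =>
    exact absurd hpre (by unfold Pre_convert_sectors_observed_format_py pvPreCheck; simp [h])
  | some s =>
    simp only [h]
    by_cases hi : PySem.Str.isIn "_" s = true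
    · simp only [hi, Bool.true_or, if_true, Bool.not_true, Bool.false_and, Bool.false_eq_true,
        if_false]
      rw [pv_mask_eq]
    · rw [Bool.not_eq_true] at hi
      by_cases hl : PySem.Str.len s = 150
      · have h1 : (PySem.Str.len s != 150) = false := by
          rw [bne_eq_false_iff_eq]; exact hl
        have h2 : (PySem.Str.len s == 150) = true := by
          rw [beq_iff_eq]; exact hl
        simp only [hi, h1, Bool.or_false, Bool.false_eq_true, if_false, Bool.not_false, h2,
          Bool.true_and, if_true]
      · have h1 : (PySem.Str.len s != 150) = true := by
          rw [bne_iff_ne]; exact hl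
        have h2 : (PySem.Str.len s == 150) = false := by
          rw [beq_eq_false_iff_ne]; exact hl
        simp only [hi, h1, Bool.or_true, if_true, Bool.not_false, h2, Bool.and_false,
          Bool.false_eq_true, if_false]
        rw [pv_mask_eq]
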